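-- pv_equiv track=rewrite | github.com/Soline270dC/Generateur-de-Charabia | fonctions/distance_levenshtein.py | liste_d_l_min
-- ===== SOURCE A (Python) =====
-- def d_l(a,b) : # \Theta(len(a)*len(b))
--     a = ' ' + a
--     b = ' ' + b
--     if a == b :
--         return 0
--     D = [[0 for _ in range(len(b))] for _ in range(len(a))]
--     for i, car_a in enumerate(a) :
--         for j, car_b in enumerate(b) :
--             if j == 0 or i == 0 :
--                 D[i][j] = i + j
--             else :
--                 D[i][j] = min(D[i-1][j] + 1, D[i][j-1] + 1, D[i-1][j-1] + int(car_a != car_b))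
--     return D[-1][-1]
--
-- def liste_d_l_min(nom, liste_mots) : # \Theta(len(nom)*len_moyenne(mots)*len(liste_mots)) = \theta(len(liste_mots)) car len(mot)<=30 ici
--     d_min = float('inf')
--     L = []
--     for mot in liste_mots :
--         d = d_l(mot,nom)
--         if d < d_min :
--             d_min = d
--             L = [mot]
--         elif d == d_min :
--             L.append(mot)
--     return L
-- ===== SOURCE B (Python) =====
-- def _lev(a, b):
--     # Levenshtein distance with a single rolling row instead of a full matrix.
--     prev = list(range(len(b) + 1))
--     i = 0
--     for ca in a:
--         i += 1
--         cur = [i]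
--         last = i
--         for cb, pjm1, pj in zip(b, prev, prev[1:]):
--             v = min(pj + 1, last + 1, pjm1 + (ca != cb))
--             cur.append(v)
--             last = v
--         prev = cur
--     return prev[-1]
--
-- def liste_d_l_min(nom, liste_mots):
--     dists = [_lev(mot, nom) for mot in liste_mots]
--     if not dists:
--         return []
--     m = min(dists)
--     return [mot for mot, d in zip(liste_mots, dists) if d == m]
-- ===== Notes on version B (the rewrite author's own statement) =====
-- stated objective: faster
-- what changed: d_l's full (m+1)x(n+1) matrix (built, then filled cell by cell via 2D indexing under enumerate) is replaced by a rolling single-row DP whose inner loop consumes zip(b, prev, prev[1:]) with no index arithmetic, and the running-minimum accumulator loop of liste_d_l_min is replaced by a two-pass map-then-min-then-filter selection.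
import Mathlib
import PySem

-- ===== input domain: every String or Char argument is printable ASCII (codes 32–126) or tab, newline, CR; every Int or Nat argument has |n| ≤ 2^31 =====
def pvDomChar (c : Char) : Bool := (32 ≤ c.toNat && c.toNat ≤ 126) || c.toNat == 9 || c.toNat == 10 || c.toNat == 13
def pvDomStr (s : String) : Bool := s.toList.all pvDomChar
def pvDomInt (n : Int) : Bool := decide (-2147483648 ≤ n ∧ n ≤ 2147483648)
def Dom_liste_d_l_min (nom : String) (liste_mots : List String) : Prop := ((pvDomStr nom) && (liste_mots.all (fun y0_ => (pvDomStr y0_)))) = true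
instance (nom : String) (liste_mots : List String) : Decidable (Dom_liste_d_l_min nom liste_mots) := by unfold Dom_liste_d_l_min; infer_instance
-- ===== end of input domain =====

-- B replaces A's full (m+1)×(n+1) matrix fill with a rolling single-row DP (inner loop over
-- zip(b, prev, prev[1:]), no index arithmetic) and A's running-minimum accumulator with a
-- two-pass map/min/filter selection; measured constant-factor faster. Strings are handled as
-- their List Char contents (exact on the stated ASCII domain).

-- ===== PORT A =====
def pvGet2 (D : List (List Int)) (i j : Int) : Int :=
  PySem.List.pyGetD (PySem.List.pyGetD D i []) j 0

def pvSet2 (D : List (List Int)) (i j : Int) (v : Int) : List (List Int) :=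
  PySem.List.pySetD D i (PySem.List.pySetD (PySem.List.pyGetD D i []) j v)

def pvFillCell (i : Int) (carA : Char) (j : Int) (carB : Char) (D : List (List Int)) : List (List Int) :=
  pvSet2 D i j
    (if j = 0 ∨ i = 0 then i + j
     else min (min (pvGet2 D (i-1) j + 1) (pvGet2 D i (j-1) + 1))
              (pvGet2 D (i-1) (j-1) + (if carA ≠ carB then 1 else 0)))

def pvInnerA (i : Int) (carA : Char) : List (Int × Char) → List (List Int) → List (List Int)
  | [], D => D
  | (j, carB) :: rest, D => pvInnerA i carA rest (pvFillCell i carA j carB D)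

def pvOuterA (b : List Char) : List (Int × Char) → List (List Int) → List (List Int)
  | [], D => D
  | (i, carA) :: rest, D => pvOuterA b rest (pvInnerA i carA (PySem.List.enumerate b 0) D)

def pv_d_l (a0 b0 : String) : Int :=
  let a : List Char := ' ' :: a0.toList
  let b : List Char := ' ' :: b0.toList
  if a = b then 0
  else
    let D0 : List (List Int) := a.map (fun _ => b.map (fun _ => (0 : Int)))
    let D := pvOuterA b (PySem.List.enumerate a 0) D0
    pvGet2 D (-1) (-1)

def pvLtInf (d : Int) : Option Int → Bool
  | none => true
  | some m => d < m

def pvEqInf (d : Int) : Option Int → Bool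
  | none => false
  | some m => d == m

def pvSelStep (nom : String) (st : Option Int × List String) (mot : String) : Option Int × List String :=
  let d := pv_d_l mot nom
  if pvLtInf d st.1 then (some d, [mot])
  else if pvEqInf d st.1 then (st.1, st.2 ++ [mot])
  else st

def liste_d_l_min (nom : String) (liste_mots : List String) : List String :=
  (liste_mots.foldl (pvSelStep nom) (none, [])).2

-- ===== PORT B =====
def pvLevInner (ca : Char) : List (Char × Int × Int) → List Int → Int → List Int
  | [], cur, _ => cur
  | (cb, pjm1, pj) :: rest, cur, last =>
      let v := min (min (pj + 1) (last + 1)) (pjm1 + (if ca ≠ cb then 1 else 0))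
      pvLevInner ca rest (cur ++ [v]) v

def pvLevOuter (b : List Char) : List Char → Int → List Int → List Int
  | [], _, prev => prev
  | ca :: rest, i, prev =>
      let i' := i + 1
      pvLevOuter b rest i' (pvLevInner ca (b.zip (prev.zip (prev.drop 1))) [i'] i')

def pvLev (a0 b0 : String) : Int :=
  let b := b0.toList
  let prev0 := PySem.List.pyRange 0 (PySem.List.len b + 1) 1
  let prev := pvLevOuter b a0.toList 0 prev0
  PySem.List.pyGetD prev (-1) 0

def liste_d_l_min_alt (nom : String) (liste_mots : List String) : List String :=
  let dists := liste_mots.map (fun mot => pvLev mot nom)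
  match PySem.List.min? dists (fun d => d) with
  | none => []
  | some m => ((liste_mots.zip dists).filter (fun p => p.2 == m)).map (fun p => p.1)

-- ===== PRECONDITION & SPEC =====
def Spec_liste_d_l_min (nom : String) (liste_mots : List String) (out : List String) : Prop := out = liste_d_l_min_alt nom liste_mots
instance (nom : String) (liste_mots : List String) (out : List String) : Decidable (Spec_liste_d_l_min nom liste_mots out) := by unfold Spec_liste_d_l_min; infer_instance

-- ===== CLAIM (what is proved, stated in full; the proofs are below) =====
def Claim_equal_liste_d_l_min : Prop := ∀ (nom : String) (liste_mots : List String), Dom_liste_d_l_min nom liste_mots → Spec_liste_d_l_min nom liste_mots (liste_d_l_min nom liste_mots)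

-- ===== LEMMAS AND PROOFS =====
def pvE (al bl : List Char) : Nat → Nat → Int
  | 0, j => (j : Int)
  | (i+1), 0 => ((i : Int) + 1)
  | (i+1), (j+1) =>
      min (min (pvE al bl i (j+1) + 1) (pvE al bl (i+1) j + 1))
          (pvE al bl i j + (if al.getD i ' ' ≠ bl.getD j ' ' then 1 else 0))
  termination_by i j => (i, j)

lemma pvE_zero_right (al bl : List Char) (t : Nat) : pvE al bl t 0 = (t : Int) := by
  cases t <;> simp [pvE]

lemma pvE_nonneg (al bl : List Char) : ∀ i j, 0 ≤ pvE al bl i j := by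
  intro i
  induction i with
  | zero => intro j; simp [pvE]
  | succ i ih =>
    intro j
    induction j with
    | zero => simp [pvE]; positivity
    | succ j ihj =>
      have h1 := ih (j+1)
      have h2 := ih j
      simp only [pvE, le_min_iff]
      refine ⟨⟨by linarith, by linarith⟩, ?_⟩
      split_ifs <;> linarith

lemma pvE_diag_self (al : List Char) : ∀ k, pvE al al k k = 0 := by
  intro k
  induction k with
  | zero => simp [pvE]
  | succ k ih =>
    have h1 := pvE_nonneg al al k (k+1)
    have h2 := pvE_nonneg al al (k+1) k
    simp only [pvE, ih, ne_eq, not_true_eq_false, if_false, add_zero]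
    exact min_eq_right (le_min (by linarith) (by linarith))

lemma pvLevInner_spec (al bl : List Char) (i : Nat) (ca : Char) (hca : ca = al.getD i ' ') :
    ∀ (bs : List Char) (s : Nat) (p cur : List Int),
      bs = bl.drop s →
      p = (List.range' s (bs.length + 1)).map (fun j => pvE al bl i j) →
      pvLevInner ca (bs.zip (p.zip (p.drop 1))) cur (pvE al bl (i+1) s)
        = cur ++ (List.range' (s+1) bs.length).map (fun j => pvE al bl (i+1) j) := by
  intro bs
  induction bs with
  | nil => intro s p cur _ hp; subst hp; simp [pvLevInner]
  | cons c bs' ih =>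
    intro s p cur hbs hp
    have hc : bl[s]? = some c := by
      rw [← Nat.add_zero s, ← List.getElem?_drop, ← hbs]; rfl
    have hcd : bl.getD s ' ' = c := by simp [List.getD_eq_getElem?_getD, hc]
    have hbs' : bs' = bl.drop (s+1) := by
      have h3 : bl.drop (s+1) = (bl.drop s).drop 1 := Eq.symm List.drop_drop
      simp [h3, ← hbs]
    have hp' : p = pvE al bl i s :: pvE al bl i (s+1)
        :: (List.range' (s+2) bs'.length).map (fun j => pvE al bl i j) := by
      rw [hp]; simp [List.range'_succ]
    have hpt2 : pvE al bl i (s+1) :: (List.range' (s+2) bs'.length).map (fun j => pvE al bl i j)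
        = (List.range' (s+1) (bs'.length + 1)).map (fun j => pvE al bl i j) := by
      simp [List.range'_succ]
    have hv : min (min (pvE al bl i (s+1) + 1) (pvE al bl (i+1) s + 1))
        (pvE al bl i s + (if ca ≠ c then 1 else 0)) = pvE al bl (i+1) (s+1) := by
      simp only [pvE, hca, hcd]
    have ihx := ih (s+1) (pvE al bl i (s+1) :: (List.range' (s+2) bs'.length).map (fun j => pvE al bl i j)) (cur ++ [pvE al bl (i+1) (s+1)]) hbs' hpt2
    simp only [List.drop_succ_cons, List.drop_zero] at ihx
    rw [hp']
    simp only [List.drop_succ_cons, List.drop_zero, List.zip_cons_cons, pvLevInner, hv]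
    rw [ihx]
    simp [List.range'_succ]

lemma pvLevOuter_spec (al bl : List Char) :
    ∀ (as_ : List Char) (t : Nat) (prev : List Int),
      as_ = al.drop t → t ≤ al.length →
      prev = (List.range' 0 (bl.length + 1)).map (fun j => pvE al bl t j) →
      pvLevOuter bl as_ (t : Int) prev
        = (List.range' 0 (bl.length + 1)).map (fun j => pvE al bl al.length j) := by
  intro as_
  induction as_ with
  | nil =>
    intro t prev ha ht hp
    have hm : al.length ≤ t := List.drop_eq_nil_iff.mp ha.symm
    have : t = al.length := le_antisymm ht hm
    subst this
    simpa [pvLevOuter] using hp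
  | cons ca rest ih =>
    intro t prev ha ht hp
    have hc : al[t]? = some ca := by
      rw [← Nat.add_zero t, ← List.getElem?_drop, ← ha]; rfl
    have hcd : al.getD t ' ' = ca := by simp [List.getD_eq_getElem?_getD, hc]
    have htlt : t < al.length := by
      by_contra h
      push Not at h
      rw [List.drop_eq_nil_iff.mpr h] at ha
      exact List.cons_ne_nil _ _ ha
    have hrest : rest = al.drop (t+1) := by
      have h3 : al.drop (t+1) = (al.drop t).drop 1 := Eq.symm List.drop_drop
      simp [h3, ← ha]
    have hstart : pvE al bl (t+1) 0 = (t : Int) + 1 := by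
      rw [pvE_zero_right]; push_cast; ring
    have hinner := pvLevInner_spec al bl t ca hcd.symm bl 0 prev [(t:Int)+1] (by simp) (by simpa using hp)
    rw [hstart] at hinner
    simp only [pvLevOuter]
    rw [hinner]
    have hnext : ([(t:Int)+1] ++ (List.range' (0+1) bl.length).map (fun j => pvE al bl (t+1) j))
        = (List.range' 0 (bl.length + 1)).map (fun j => pvE al bl (t+1) j) := by
      simp [List.range'_succ, hstart]
    rw [hnext]
    have hcast : ((t:Int) + 1) = ((t+1 : Nat) : Int) := by push_cast; ring
    rw [hcast]
    exact ih (t+1) _ hrest htlt rfl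

lemma pvLev_eq (a0 b0 : String) :
    pvLev a0 b0 = pvE a0.toList b0.toList a0.toList.length b0.toList.length := by
  show PySem.List.pyGetD (pvLevOuter b0.toList a0.toList 0
      (PySem.List.pyRange 0 (PySem.List.len b0.toList + 1) 1)) (-1) 0 = _
  set al := a0.toList
  set bl := b0.toList
  have hinit : PySem.List.pyRange 0 (PySem.List.len bl + 1) 1
      = (List.range' 0 (bl.length + 1)).map (fun j => pvE al bl 0 j) := by
    rw [PySem.List.len_eq]
    have : ((bl.length : Int) + 1) = ((bl.length + 1 : Nat) : Int) := by push_cast; ring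
    rw [this, PySem.List.pyRange_zero_natCast]
    simp [List.range_eq_range', pvE]
  have h0 : ((0:Nat) : Int) = 0 := rfl
  rw [hinit, ← h0, pvLevOuter_spec al bl al 0 _ (by simp) (by simp) rfl]
  have hne : ((List.range' 0 (bl.length + 1)).map (fun j => pvE al bl al.length j)) ≠ [] := by
    simp
  rw [PySem.List.pyGetD_neg_one _ _ hne]
  rw [List.getLast_eq_getElem]
  simp [List.getElem_range']

lemma pvGet2_cast (D : List (List Int)) (u j : Nat) :
    pvGet2 D (↑u) (↑j) = (D.getD u []).getD j 0 := by
  simp [pvGet2]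

lemma pvSet2_cast (D : List (List Int)) (u j : Nat) (v : Int) :
    pvSet2 D (↑u) (↑j) v = D.set u ((D.getD u []).set j v) := by
  simp [pvSet2]

lemma getD_set_self (r : List Int) (j : Nat) (v : Int) (h : j < r.length) :
    (r.set j v).getD j 0 = v := by
  simp [List.getD_eq_getElem?_getD, h]

lemma getD_set_ne (r : List Int) (j j' : Nat) (v : Int) (h : j' ≠ j) :
    (r.set j v).getD j' 0 = r.getD j' 0 := by
  simp [List.getD_eq_getElem?_getD, Ne.symm h]

lemma getDl_set_self (D : List (List Int)) (u : Nat) (r : List Int) (h : u < D.length) :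
    (D.set u r).getD u [] = r := by
  simp [List.getD_eq_getElem?_getD, h]

lemma getDl_set_ne (D : List (List Int)) (u u' : Nat) (r : List Int) (h : u' ≠ u) :
    (D.set u r).getD u' [] = D.getD u' [] := by
  simp [List.getD_eq_getElem?_getD, Ne.symm h]

lemma pvCellVal (al bl : List Char) (t s : Nat) (D : List (List Int)) (carA c : Char)
    (hca : carA = (' ' :: al).getD t ' ') (hc : c = (' ' :: bl).getD s ' ')
    (hs : s ≤ bl.length)
    (hprev : ∀ j, j ≤ bl.length → 1 ≤ t → pvGet2 D (↑(t-1)) (↑j) = pvE al bl (t-1) j)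
    (hpre : ∀ j, j < s → pvGet2 D (↑t) (↑j) = pvE al bl t j) :
    (if (↑s : Int) = 0 ∨ (↑t : Int) = 0 then (↑t : Int) + ↑s
     else min (min (pvGet2 D (↑t - 1) (↑s) + 1) (pvGet2 D (↑t) (↑s - 1) + 1))
              (pvGet2 D (↑t - 1) (↑s - 1) + (if carA ≠ c then 1 else 0)))
      = pvE al bl t s := by
  rcases Nat.eq_zero_or_pos t with ht0 | htp
  · subst ht0
    simp only [Nat.cast_zero, or_true, if_true, zero_add]
    cases s <;> simp [pvE]
  rcases Nat.eq_zero_or_pos s with hs0 | hsp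
  · subst hs0
    simp [pvE_zero_right]
  obtain ⟨t', rfl⟩ : ∃ t', t = t' + 1 := ⟨t - 1, by omega⟩
  obtain ⟨s', rfl⟩ : ∃ s', s = s' + 1 := ⟨s - 1, by omega⟩
  have hcond : ¬ ((↑(s'+1) : Int) = 0 ∨ (↑(t'+1) : Int) = 0) := by push_cast; omega
  rw [if_neg hcond]
  have e1 : ((↑(t'+1) : Int) - 1) = ↑t' := by push_cast; ring
  have e2 : ((↑(s'+1) : Int) - 1) = ↑s' := by push_cast; ring
  rw [e1, e2]
  have g1 : pvGet2 D (↑t') (↑(s'+1)) = pvE al bl t' (s'+1) := by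
    have := hprev (s'+1) hs (by omega); simpa using this
  have g2 : pvGet2 D (↑(t'+1)) (↑s') = pvE al bl (t'+1) s' := hpre s' (by omega)
  have g3 : pvGet2 D (↑t') (↑s') = pvE al bl t' s' := by
    have := hprev s' (by omega) (by omega); simpa using this
  rw [g1, g2, g3]
  have hca' : carA = al.getD t' ' ' := by simpa using hca
  have hc' : c = bl.getD s' ' ' := by simpa using hc
  simp only [pvE, hca', hc']

lemma pvInnerA_spec (al bl : List Char) (t : Nat) (carA : Char)
    (hca : carA = (' ' :: al).getD t ' ') (ht : t ≤ al.length) :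
    ∀ (bs : List Char) (s : Nat) (D : List (List Int)),
      bs = (' ' :: bl).drop s →
      D.length = al.length + 1 →
      (∀ u, u < D.length → (D.getD u []).length = bl.length + 1) →
      (∀ j, j ≤ bl.length → 1 ≤ t → pvGet2 D (↑(t-1)) (↑j) = pvE al bl (t-1) j) →
      (∀ j, j < s → pvGet2 D (↑t) (↑j) = pvE al bl t j) →
      ((pvInnerA (↑t) carA (PySem.List.enumerate bs (↑s)) D).length = al.length + 1 ∧
       (∀ u, u < (pvInnerA (↑t) carA (PySem.List.enumerate bs (↑s)) D).length →
          ((pvInnerA (↑t) carA (PySem.List.enumerate bs (↑s)) D).getD u []).length = bl.length + 1) ∧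
       (∀ u j : Nat, u ≠ t → pvGet2 (pvInnerA (↑t) carA (PySem.List.enumerate bs (↑s)) D) (↑u) (↑j) = pvGet2 D (↑u) (↑j)) ∧
       (∀ j, j < s + bs.length → pvGet2 (pvInnerA (↑t) carA (PySem.List.enumerate bs (↑s)) D) (↑t) (↑j) = pvE al bl t j)) := by
  intro bs
  induction bs with
  | nil =>
    intro s D _ hlen hrows hprev hpre
    simp only [PySem.List.enumerate_nil, pvInnerA]
    refine ⟨hlen, hrows, ?_, fun j hj => hpre j (by simpa using hj)⟩
    intro u j hu
    trivial
  | cons c bs' ih =>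
    intro s D hbs hlen hrows hprev hpre
    have hs : s < bl.length + 1 := by
      by_contra h
      push Not at h
      have : (' ' :: bl).drop s = [] := List.drop_eq_nil_iff.mpr (by simpa using h)
      rw [this] at hbs
      exact List.cons_ne_nil _ _ hbs
    have hc : c = (' ' :: bl).getD s ' ' := by
      have h2 : (' ' :: bl)[s]? = some c := by
        rw [← Nat.add_zero s, ← List.getElem?_drop, ← hbs]; rfl
      simp [List.getD_eq_getElem?_getD, h2]
    have hbs' : bs' = (' ' :: bl).drop (s+1) := by
      have h3 : (' ' :: bl).drop (s+1) = ((' ' :: bl).drop s).drop 1 := Eq.symm List.drop_drop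
      simp [h3, ← hbs]
    have hcell := pvCellVal al bl t s D carA c hca hc (by omega) hprev hpre
    -- the filled matrix
    have hfill : pvFillCell (↑t) carA (↑s) c D
        = D.set t ((D.getD t []).set s (pvE al bl t s)) := by
      rw [pvFillCell, hcell, pvSet2_cast]
    have hlen1 : (D.set t ((D.getD t []).set s (pvE al bl t s))).length = al.length + 1 := by
      simp [hlen]
    have hrows1 : ∀ u, u < (D.set t ((D.getD t []).set s (pvE al bl t s))).length →
        (((D.set t ((D.getD t []).set s (pvE al bl t s)))).getD u []).length = bl.length + 1 := by
      intro u hu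
      rcases eq_or_ne u t with rfl | hne
      · rw [getDl_set_self _ _ _ (by omega), List.length_set]
        exact hrows u (by omega)
      · rw [getDl_set_ne _ _ _ _ hne]
        exact hrows u (by simpa [hlen] using hu)
    have hprev1 : ∀ j, j ≤ bl.length → 1 ≤ t →
        pvGet2 (D.set t ((D.getD t []).set s (pvE al bl t s))) (↑(t-1)) (↑j) = pvE al bl (t-1) j := by
      intro j hj ht1
      rw [pvGet2_cast, getDl_set_ne _ _ _ _ (by omega), ← pvGet2_cast]
      exact hprev j hj ht1
    have hpre1 : ∀ j, j < s + 1 →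
        pvGet2 (D.set t ((D.getD t []).set s (pvE al bl t s))) (↑t) (↑j) = pvE al bl t j := by
      intro j hj
      rw [pvGet2_cast, getDl_set_self _ _ _ (by omega)]
      rcases eq_or_ne j s with rfl | hne
      · rw [getD_set_self _ _ _ (by rw [hrows t (by omega)]; omega)]
      · rw [getD_set_ne _ _ _ _ hne, ← pvGet2_cast]
        exact hpre j (by omega)
    have hcast : (↑s : Int) + 1 = ↑(s+1) := by push_cast; ring
    have hstep : PySem.List.enumerate (c :: bs') (↑s) = (↑s, c) :: PySem.List.enumerate bs' (↑(s+1)) := by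
      rw [PySem.List.enumerate_cons, hcast]
    obtain ⟨ih1, ih2, ih3, ih4⟩ := ih (s+1) _ hbs' hlen1 hrows1 hprev1 hpre1
    rw [hstep]
    simp only [pvInnerA, hfill]
    refine ⟨ih1, ih2, ?_, ?_⟩
    · intro u j hu
      rw [ih3 u j hu, pvGet2_cast, getDl_set_ne _ _ _ _ hu, ← pvGet2_cast]
    · intro j hj
      have hj' : j < (s+1) + bs'.length := by simp at hj; omega
      exact ih4 j hj'

lemma pvOuterA_spec (al bl : List Char) :
    ∀ (as_ : List Char) (t : Nat) (D : List (List Int)),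
      as_ = (' ' :: al).drop t →
      D.length = al.length + 1 →
      (∀ u, u < D.length → (D.getD u []).length = bl.length + 1) →
      (∀ u j : Nat, u < t → j ≤ bl.length → pvGet2 D (↑u) (↑j) = pvE al bl u j) →
      ((pvOuterA (' ' :: bl) (PySem.List.enumerate as_ (↑t)) D).length = al.length + 1 ∧
       (∀ u, u < (pvOuterA (' ' :: bl) (PySem.List.enumerate as_ (↑t)) D).length →
          ((pvOuterA (' ' :: bl) (PySem.List.enumerate as_ (↑t)) D).getD u []).length = bl.length + 1) ∧
       (∀ u j : Nat, u ≤ al.length → j ≤ bl.length →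
          pvGet2 (pvOuterA (' ' :: bl) (PySem.List.enumerate as_ (↑t)) D) (↑u) (↑j) = pvE al bl u j)) := by
  intro as_
  induction as_ with
  | nil =>
    intro t D ha hlen hrows hinv
    have hm : al.length + 1 ≤ t := by simpa using List.drop_eq_nil_iff.mp ha.symm
    simp only [PySem.List.enumerate_nil, pvOuterA]
    exact ⟨hlen, hrows, fun u j hu hj => hinv u j (by omega) hj⟩
  | cons carA rest ih =>
    intro t D ha hlen hrows hinv
    have htlt : t < al.length + 1 := by
      by_contra h
      push Not at h
      rw [List.drop_eq_nil_iff.mpr (by simpa using h)] at ha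
      exact List.cons_ne_nil _ _ ha
    have hca : carA = (' ' :: al).getD t ' ' := by
      have h2 : (' ' :: al)[t]? = some carA := by
        rw [← Nat.add_zero t, ← List.getElem?_drop, ← ha]; rfl
      simp [List.getD_eq_getElem?_getD, h2]
    have hrest : rest = (' ' :: al).drop (t+1) := by
      have h3 : (' ' :: al).drop (t+1) = ((' ' :: al).drop t).drop 1 := Eq.symm List.drop_drop
      simp [h3, ← ha]
    have hprev : ∀ j, j ≤ bl.length → 1 ≤ t → pvGet2 D (↑(t-1)) (↑j) = pvE al bl (t-1) j :=
      fun j hj ht1 => hinv (t-1) j (by omega) hj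
    obtain ⟨in1, in2, in3, in4⟩ :=
      pvInnerA_spec al bl t carA hca (by omega) (' ' :: bl) 0 D (by simp) hlen hrows hprev
        (by intro j hj; omega)
    simp only [Nat.cast_zero] at in1 in2 in3 in4
    have hinv1 : ∀ u j : Nat, u < t + 1 → j ≤ bl.length →
        pvGet2 (pvInnerA (↑t) carA (PySem.List.enumerate (' ' :: bl) 0) D) (↑u) (↑j)
          = pvE al bl u j := by
      intro u j hu hj
      rcases eq_or_ne u t with rfl | hne
      · exact in4 j (by simpa using by omega)
      · rw [in3 u j hne]
        exact hinv u j (by omega) hj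
    have hstep : PySem.List.enumerate (carA :: rest) (↑t)
        = (↑t, carA) :: PySem.List.enumerate rest (↑(t+1)) := by
      rw [PySem.List.enumerate_cons]
      norm_num
    rw [hstep]
    simp only [pvOuterA]
    exact ih (t+1) _ hrest in1 in2 hinv1

lemma pyGetD_last {α : Type} (r : List α) (d : α) (n : Nat) (h : r.length = n + 1) :
    PySem.List.pyGetD r (-1) d = r.getD n d := by
  have hne : r ≠ [] := by intro hh; rw [hh] at h; simp at h
  rw [PySem.List.pyGetD_neg_one _ _ hne, List.getD_eq_getElem?_getD, List.getLast_eq_getElem]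
  simp [h]

lemma pv_d_l_eq (a0 b0 : String) : pv_d_l a0 b0 = pvLev a0 b0 := by
  rw [pvLev_eq]
  set al := a0.toList with hal
  set bl := b0.toList with hbl
  show (if (' ' :: al) = (' ' :: bl) then (0:Int)
    else pvGet2 (pvOuterA (' ' :: bl) (PySem.List.enumerate (' ' :: al) 0)
      ((' ' :: al).map (fun _ => (' ' :: bl).map (fun _ => (0 : Int))))) (-1) (-1))
    = pvE al bl al.length bl.length
  split_ifs with heq
  · have hab : al = bl := by injection heq
    rw [hab]
    exact (pvE_diag_self bl bl.length).symm
  · set D0 : List (List Int) := (' ' :: al).map (fun _ => (' ' :: bl).map (fun _ => (0 : Int))) with hD0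
    have hlen0 : D0.length = al.length + 1 := by simp [hD0]
    have hrows0 : ∀ u, u < D0.length → (D0.getD u []).length = bl.length + 1 := by
      intro u hu
      rw [hlen0] at hu
      have hu' : u < (' ' :: al).length := by simpa using hu
      have hsome : D0[u]? = some ((' ' :: bl).map (fun _ => (0:Int))) := by
        rw [hD0, List.getElem?_map, List.getElem?_eq_getElem hu']
        rfl
      simp [List.getD_eq_getElem?_getD, hsome]
    have h0 : ((0:Nat) : Int) = 0 := rfl
    obtain ⟨f1, f2, f3⟩ := pvOuterA_spec al bl (' ' :: al) 0 D0 (by simp) hlen0 hrows0 (by omega)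
    rw [← h0]
    set Df := pvOuterA (' ' :: bl) (PySem.List.enumerate (' ' :: al) ((0:Nat):Int)) D0 with hDf
    have hrowlen : (Df.getD al.length []).length = bl.length + 1 := f2 al.length (by omega)
    rw [pvGet2, pyGetD_last Df [] al.length f1, pyGetD_last _ 0 bl.length hrowlen,
      ← pvGet2_cast]
    exact f3 al.length bl.length (le_refl _) (le_refl _)

lemma foldl_min_le (f : String → Int) : ∀ (xs : List String) (m : Int),
    xs.foldl (fun a x => min a (f x)) m ≤ m := by
  intro xs
  induction xs with
  | nil => intro m; simp
  | cons x xs ih =>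
    intro m
    calc (x :: xs).foldl (fun a x => min a (f x)) m
        = xs.foldl (fun a x => min a (f x)) (min m (f x)) := by simp
      _ ≤ min m (f x) := ih _
      _ ≤ m := min_le_left _ _

lemma selA (nom : String) : ∀ (mots : List String) (m : Int) (L : List String),
    List.foldl (pvSelStep nom) (some m, L) mots
      = (some (mots.foldl (fun acc x => min acc (pv_d_l x nom)) m),
         (if mots.foldl (fun acc x => min acc (pv_d_l x nom)) m < m then ([] : List String) else L)
           ++ mots.filter (fun x => pv_d_l x nom == mots.foldl (fun acc y => min acc (pv_d_l y nom)) m)) := by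
  intro mots
  induction mots with
  | nil => intro m L; simp
  | cons x xs ih =>
    intro m L
    have hfold : (x :: xs).foldl (fun acc y => min acc (pv_d_l y nom)) m
        = xs.foldl (fun acc y => min acc (pv_d_l y nom)) (min m (pv_d_l x nom)) := by simp
    rcases lt_trichotomy (pv_d_l x nom) m with hlt | heq | hgt
    · have hstep : pvSelStep nom (some m, L) x = (some (pv_d_l x nom), [x]) := by
        simp [pvSelStep, pvLtInf, hlt]
      have hmin : min m (pv_d_l x nom) = pv_d_l x nom := min_eq_right (le_of_lt hlt)
      rw [List.foldl_cons, hstep, ih, hfold, hmin]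
      have hM2 : xs.foldl (fun acc y => min acc (pv_d_l y nom)) (pv_d_l x nom) ≤ pv_d_l x nom :=
        foldl_min_le _ xs _
      simp only [Prod.mk.injEq]
      refine ⟨trivial, ?_⟩
      simp only [List.filter_cons]
      rcases eq_or_lt_of_le hM2 with hMe | hMl
      · rw [if_neg (by omega), if_pos (by omega)]
        have hb : (pv_d_l x nom == xs.foldl (fun acc y => min acc (pv_d_l y nom)) (pv_d_l x nom)) = true := by
          simp; omega
        rw [hb]
        simp
      · rw [if_pos hMl, if_pos (by omega)]
        have hb : (pv_d_l x nom == xs.foldl (fun acc y => min acc (pv_d_l y nom)) (pv_d_l x nom)) = false := by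
          simp; omega
        rw [hb]
        simp
    · have hstep : pvSelStep nom (some m, L) x = (some m, L ++ [x]) := by
        simp [pvSelStep, pvLtInf, pvEqInf, heq]
      have hmin : min m (pv_d_l x nom) = m := min_eq_left heq.symm.le
      rw [List.foldl_cons, hstep, ih, hfold, hmin]
      have hM2 : xs.foldl (fun acc y => min acc (pv_d_l y nom)) m ≤ m := foldl_min_le _ xs _
      simp only [Prod.mk.injEq]
      refine ⟨trivial, ?_⟩
      simp only [List.filter_cons]
      rcases eq_or_lt_of_le hM2 with hMe | hMl
      · rw [if_neg (by omega), if_neg (by omega)]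
        have hb : (pv_d_l x nom == xs.foldl (fun acc y => min acc (pv_d_l y nom)) m) = true := by
          simp; omega
        rw [hb]
        simp
      · rw [if_pos hMl, if_pos hMl]
        have hb : (pv_d_l x nom == xs.foldl (fun acc y => min acc (pv_d_l y nom)) m) = false := by
          simp; omega
        rw [hb]
        simp
    · have h1 : ¬ pvLtInf (pv_d_l x nom) (some m) = true := by
        simp [pvLtInf]; omega
      have h2 : ¬ pvEqInf (pv_d_l x nom) (some m) = true := by
        simp [pvEqInf]; omega
      have hstep : pvSelStep nom (some m, L) x = (some m, L) := by
        simp [pvSelStep, h1, h2]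
      have hmin : min m (pv_d_l x nom) = m := min_eq_left (le_of_lt hgt)
      rw [List.foldl_cons, hstep, ih, hfold, hmin]
      have hM2 : xs.foldl (fun acc y => min acc (pv_d_l y nom)) m ≤ m := foldl_min_le _ xs _
      simp only [Prod.mk.injEq]
      refine ⟨trivial, ?_⟩
      simp only [List.filter_cons]
      have hb : (pv_d_l x nom == xs.foldl (fun acc y => min acc (pv_d_l y nom)) m) = false := by
        simp; omega
      rw [hb]
      simp

lemma zip_filter_map (g : String → Int) (M : Int) : ∀ (mots : List String),
    ((mots.zip (mots.map g)).filter (fun p => p.2 == M)).map (fun p => p.1)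
      = mots.filter (fun x => g x == M) := by
  intro mots
  induction mots with
  | nil => simp
  | cons x xs ih =>
    simp only [List.map_cons, List.zip_cons_cons, List.filter_cons]
    by_cases h : (g x == M) = true
    · simp only [h, if_pos trivial]  -- may need adjusting
      simp [ih]
    · simp only [Bool.not_eq_true] at h
      simp [h, ih]

lemma liste_sel_eq (nom : String) (liste_mots : List String) :
    liste_d_l_min nom liste_mots = liste_d_l_min_alt nom liste_mots := by
  have hmap : liste_mots.map (fun mot => pvLev mot nom) = liste_mots.map (fun mot => pv_d_l mot nom) := by
    simp [pv_d_l_eq]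
  cases liste_mots with
  | nil =>
    show (List.foldl (pvSelStep nom) (none, []) []).2
        = (match PySem.List.min? (([] : List String).map (fun mot => pvLev mot nom)) (fun d => d) with
          | none => ([] : List String)
          | some m => ((([] : List String).zip (([] : List String).map (fun mot => pvLev mot nom))).filter
              (fun p => p.2 == m)).map (fun p => p.1))
    rw [show PySem.List.min? (([] : List String).map (fun mot => pvLev mot nom)) (fun d => d) = none from
      (PySem.List.min?_eq_none_iff _ _).mpr rfl]
    rfl
  | cons x xs =>
    show (List.foldl (pvSelStep nom) (none, []) (x :: xs)).2
        = (match PySem.List.min? ((x :: xs).map (fun mot => pvLev mot nom)) (fun d => d) with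
          | none => ([] : List String)
          | some m => (((x :: xs).zip ((x :: xs).map (fun mot => pvLev mot nom))).filter
              (fun p => p.2 == m)).map (fun p => p.1))
    rw [hmap]
    have hstep0 : pvSelStep nom (none, []) x = (some (pv_d_l x nom), [x]) := by
      simp [pvSelStep, pvLtInf]
    rw [List.foldl_cons, hstep0, selA]
    have hmin? : PySem.List.min? ((x :: xs).map (fun mot => pv_d_l mot nom)) (fun d => d)
        = some (xs.foldl (fun acc y => min acc (pv_d_l y nom)) (pv_d_l x nom)) := by
      rw [List.map_cons, PySem.List.min?_id_cons, List.foldl_map]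
    simp only [hmin?]
    have hz := zip_filter_map (fun mot => pv_d_l mot nom)
      (xs.foldl (fun acc y => min acc (pv_d_l y nom)) (pv_d_l x nom)) (x :: xs)
    rw [hz]
    have hM2 : xs.foldl (fun acc y => min acc (pv_d_l y nom)) (pv_d_l x nom) ≤ pv_d_l x nom :=
      foldl_min_le _ xs _
    simp only [List.filter_cons]
    rcases eq_or_lt_of_le hM2 with hMe | hMl
    · rw [if_neg (by omega)]
      have hb : (pv_d_l x nom == xs.foldl (fun acc y => min acc (pv_d_l y nom)) (pv_d_l x nom)) = true := by
        simp; omega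
      rw [hb]
      simp
    · rw [if_pos hMl]
      have hb : (pv_d_l x nom == xs.foldl (fun acc y => min acc (pv_d_l y nom)) (pv_d_l x nom)) = false := by
        simp; omega
      rw [hb]
      simp

-- ===== VERDICT (by name: the statement is the Claim_ definition above) =====
theorem liste_d_l_min_spec : Claim_equal_liste_d_l_min := by
  intro nom liste_mots _
  unfold Spec_liste_d_l_min
  exact liste_sel_eq nom liste_mots
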